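-- pv_equiv track=rewrite | github.com/ANEASAlan/IAReversi | createTab.py | createTab
-- ===== SOURCE A (Python) =====
-- def createTab(factor, size = 10): #factor est le gradient logarithmique que l'on donnera aux cases (pour gradient = 3, les cases auront les valeurs 3, 9, 27 ou 81 à un signe près), size est la taille d'un côté de tableau carré (10 sur ce projet)
--     finalTab = []   # tableau des Power Spots
--
--     expo = size//2-1   # pour calculer le Power des coins selon la taille
--     j = 0
--     tabOfTabs = []  # étant donné que des lignes du tableau des Power Spots seront identiques, sans compter le signe des valeurs, je fais en premier lieu un tableau qui contiendra les lignes, pour je les y ajouterai plus tard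
--
--     # PARTIE 1 : Remplir le tableau qui contiendra les lignes à mettre dans le tableau de Power Spots
--
--     while j < size//2 : # le tableau étant très symmétrique, je calcule seulement la partie haute
--
--         tab1 = []
--         nb = factor ** (expo)   # pour calculer le Power des coins selon l'exposant calculé plus tôt
--
--         for i in range(0,size//2,2) :   # le tableau étant très symmétrique, je fais d'abord la partie haute gauche
--             tab1.append(nb) # j'ajoute la valeur du Power calculée (la premiere étant celle du coin haut gauche, 81 pour size = 10 et factor = 3)
--             if i < size//2-1 or size%2==0 : # si on est pas arrivé au-delà du milieu du board
--                 tab1.append(nb) # je le fais deux fois, car j'ai remarqué que si on applique notre façon d'assigner les power spots, on a à chaque fois deux fois la même valeur à la suite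
--             if i < size//2-1 :  # si on est pas arrivé au-delà du milieu du board
--                 nb = nb // factor  # ensuite on change la valeur à attribuer à la case
--
--
--         nb = nb * factor
--         for i in range(size//2 + 1,size,2) :   # le tableau étant très symmétrique, je fais ensuite la partie haute droite
--             tab1.append(nb)
--             tab1.append(nb)
--             nb = nb * factor
--
--         tabOfTabs.append(tab1)
--         expo = expo - 1
--         j = j + 2
--
--     # PARTIE 2 : Remplir le tableau des Power Spots avec celui qui contient ses lignes
--
--     ind = 0
--     for k in range(0,size//2,2) :   # le tableau étant très symmétrique, je fais d'abord la partie haute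
--         tab1 = tabOfTabs[ind].copy()    # afin de pouvoir modifier certaines valeurs plus tard, je ne dois pas passer les tableaux par indices avec un append, je fais donc une copie
--         finalTab.append(tab1)   # je mets ensuite la ligne voulue
--         if k < size//2-1 or size%2==0 : # si on est pas arrivé au-delà du milieu du board
--             tab2 = tabOfTabs[ind].copy()    # je le fais deux fois, car j'ai remarqué que si on applique notre façon d'assigner les power spots, on a à chaque fois deux fois la même ligne à la suite
--             finalTab.append(tab2)
--         ind = ind + 1
--
--     ind = size//4 - 1
--     for k in range(size//2 + 1,size,2) :    # le tableau étant très symmétrique, je fais ensuite la partie basse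
--         tab1 = tabOfTabs[ind].copy()
--         finalTab.append(tab1)
--         tab2 = tabOfTabs[ind].copy()
--         finalTab.append(tab2)
--         ind = ind - 1
--
--     # PARTIE 3 : Mettre au négatif les valeurs qui devraient être négatives
--
--     for y in range(1,size//2,2) :   # le tableau étant très symmétrique, je fais d'abord la partie haute, je dois mettre au négatif une ligne sur deux
--         for x in range(0,size): # je dois mettre au négatif toute une ligne (ou colonne)
--             #if finalTab[y][x] > 0:
--             finalTab[y][x] = finalTab[y][x] * (-1)  # mettre la valeur au négatif
--
--     for y in range(size-2,size//2,-2) : # le tableau étant très symmétrique, je fais ensuite la partie basse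
--         for x in range(0,size):
--             #if finalTab[y][x] > 0:
--             finalTab[y][x] = finalTab[y][x] * (-1)
--
--     for x in range(1,size//2,2) :   # le tableau étant très symmétrique, je fais d'abord la partie gauche
--         for y in range(0,size):
--             if finalTab[y][x] > 0:
--                 finalTab[y][x] = finalTab[y][x] * (-1)
--
--     for x in range(size-2,size//2,-2) : # le tableau étant très symmétrique, je fais ensuite la partie droite
--         for y in range(0,size):
--             if finalTab[y][x] > 0:
--                 finalTab[y][x] = finalTab[y][x] * (-1)
--
--     return finalTab # le tableau est enfin fait, je peux donc le renvoyer
-- ===== SOURCE B (Python) =====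
-- def createTab(factor, size = 10):
--     half = size // 2
--     neg = set(range(1, half, 2)) | set(range(size - 2, half, -2))
--     grid = []
--     for y in range(size):
--         ey = (size - 1) // 2 - min(y, size - 1 - y) // 2
--         row = []
--         for x in range(size):
--             v = factor ** (ey - min(x, size - 1 - x) // 2)
--             if y in neg:
--                 v = -v
--             if x in neg and v > 0:
--                 v = -v
--             row.append(v)
--         grid.append(row)
--     return grid
-- ===== Notes on version B (the rewrite author's own statement) =====
-- stated objective: simpler
-- what changed: B replaces A's row-template construction, template copying, and four separate sign-flip mutation passes by one double loop that computes every cell directly from a closed-form exponent (half-1 - min(y,size-1-y)//2 - min(x,size-1-x)//2) and a precomputed negative-band set.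
-- intended difference: On odd sizes >= 1 (an exceptional shape for this even-sized-board function) A returns an accidental grid: [] for size 1 and, for sizes 4k+3, an asymmetric grid produced by negative-index wraparound (tabOfTabs[-1]) and a skewed row mapping; B returns the symmetric power-spot grid, which is the evident intent of the function. — e.g. on createTab(3, 1): A returns [], B returns [[1]]
import Mathlib
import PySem

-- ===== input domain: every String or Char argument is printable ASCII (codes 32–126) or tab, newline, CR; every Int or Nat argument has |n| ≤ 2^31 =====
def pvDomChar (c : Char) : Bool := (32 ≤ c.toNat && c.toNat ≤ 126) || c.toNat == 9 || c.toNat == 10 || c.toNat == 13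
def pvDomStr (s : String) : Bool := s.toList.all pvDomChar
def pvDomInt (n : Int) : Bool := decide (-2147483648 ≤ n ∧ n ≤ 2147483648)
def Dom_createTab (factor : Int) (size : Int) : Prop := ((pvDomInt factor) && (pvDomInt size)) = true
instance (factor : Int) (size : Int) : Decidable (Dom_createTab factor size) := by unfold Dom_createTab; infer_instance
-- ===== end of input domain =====

-- B replaces A's row-template building, copying and four sign-flip passes by one
-- double loop with a closed-form exponent and a band-membership sign rule (objective:
-- simpler); on odd sizes (D_) B returns the symmetric grid instead of A's accidental one.


-- ===== PORT A =====

-- Python '**': base ** e; exact for 0 ≤ e, which holds on every exponent either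
-- program evaluates (inside Pre_ for A; everywhere for B) — Python would produce a
-- float (or raise) for e < 0, which no admitted execution reaches.
def pvPow (b e : Int) : Int := b ^ e.toNat

-- body of A's PART 1 first for-loop (upper-left part); state = (tab1, nb)
def pvA_tab1Step1 (factor size : Int) (st : List Int × Int) (i : Int) : List Int × Int :=
  let t := st.1 ++ [st.2]
  let t := if i < PySem.Int.floordiv size 2 - 1 ∨ PySem.Int.mod size 2 = 0 then
      t ++ [st.2] else t
  let nb := if i < PySem.Int.floordiv size 2 - 1 then PySem.Int.floordiv st.2 factor else st.2
  (t, nb)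

-- body of A's PART 1 second for-loop (upper-right part)
def pvA_tab1Step2 (factor : Int) (st : List Int × Int) (_i : Int) : List Int × Int :=
  (st.1 ++ [st.2, st.2], st.2 * factor)

-- body of A's PART 1 while-loop: builds one template row 'tab1'
def pvA_tab1 (factor : Int) (size : Int) (expo : Int) : List Int :=
  let h := PySem.Int.floordiv size 2
  let st := (PySem.List.pyRange 0 h 2).foldl (pvA_tab1Step1 factor size) ([], pvPow factor expo)
  let st := (PySem.List.pyRange (h + 1) size 2).foldl (pvA_tab1Step2 factor) (st.1, st.2 * factor)
  st.1

-- A's PART 1 while-loop ('while j < size//2', j += 2, expo -= 1)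
def pvA_part1 (factor : Int) (size : Int) (expo : Int) (j : Int) (acc : List (List Int)) :
    List (List Int) :=
  if _hj : j < PySem.Int.floordiv size 2 then
    pvA_part1 factor size (expo - 1) (j + 2) (acc ++ [pvA_tab1 factor size expo])
  else acc
termination_by (PySem.Int.floordiv size 2 - j).toNat
decreasing_by omega

-- bodies of A's PART 2 loops ('tabOfTabs[ind].copy()' is pyGetD: Python list indexing
-- incl. negative indices; its default is reached only where Python raises IndexError,
-- which Pre_ excludes)
def pvA_p2Step1 (size : Int) (tabs : List (List Int)) (st : List (List Int) × Int)
    (k : Int) : List (List Int) × Int :=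
  let ft := st.1 ++ [PySem.List.pyGetD tabs st.2 []]
  let ft := if k < PySem.Int.floordiv size 2 - 1 ∨ PySem.Int.mod size 2 = 0 then
      ft ++ [PySem.List.pyGetD tabs st.2 []] else ft
  (ft, st.2 + 1)

def pvA_p2Step2 (tabs : List (List Int)) (st : List (List Int) × Int)
    (_k : Int) : List (List Int) × Int :=
  (st.1 ++ [PySem.List.pyGetD tabs st.2 [], PySem.List.pyGetD tabs st.2 []], st.2 - 1)

-- A's PART 2: assemble finalTab from tabOfTabs
def pvA_part2 (factor : Int) (size : Int) : List (List Int) :=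
  let h := PySem.Int.floordiv size 2
  let tabs := pvA_part1 factor size (h - 1) 0 []
  let st := (PySem.List.pyRange 0 h 2).foldl (pvA_p2Step1 size tabs) ([], 0)
  let st := (PySem.List.pyRange (h + 1) size 2).foldl (pvA_p2Step2 tabs)
    (st.1, PySem.Int.floordiv size 4 - 1)
  st.1

-- PART 3, row pass body: 'for x in range(0,size): finalTab[y][x] *= -1'
def pvA_passRow (size : Int) (ft : List (List Int)) (y : Int) : List (List Int) :=
  (PySem.List.pyRange 0 size 1).foldl
    (fun ft x =>
      PySem.List.pySetD ft y
        (PySem.List.pySetD (PySem.List.pyGetD ft y [])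
          x (PySem.List.pyGetD (PySem.List.pyGetD ft y []) x 0 * (-1)))) ft

-- PART 3, column pass body: 'for y in range(0,size): if finalTab[y][x] > 0: … *= -1'
def pvA_passCol (size : Int) (ft : List (List Int)) (x : Int) : List (List Int) :=
  (PySem.List.pyRange 0 size 1).foldl
    (fun ft y =>
      if PySem.List.pyGetD (PySem.List.pyGetD ft y []) x 0 > 0 then
        PySem.List.pySetD ft y
          (PySem.List.pySetD (PySem.List.pyGetD ft y [])
            x (PySem.List.pyGetD (PySem.List.pyGetD ft y []) x 0 * (-1)))
      else ft) ft

def createTab (factor : Int) (size : Int) : List (List Int) :=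
  let h := PySem.Int.floordiv size 2
  let ft := pvA_part2 factor size
  let ft := (PySem.List.pyRange 1 h 2).foldl (pvA_passRow size) ft
  let ft := (PySem.List.pyRange (size - 2) h (-2)).foldl (pvA_passRow size) ft
  let ft := (PySem.List.pyRange 1 h 2).foldl (pvA_passCol size) ft
  let ft := (PySem.List.pyRange (size - 2) h (-2)).foldl (pvA_passCol size) ft
  ft

-- ===== PORT B =====
def createTab_alt (factor : Int) (size : Int) : List (List Int) :=
  let half := PySem.Int.floordiv size 2
  let neg : PySem.Set Int :=
    PySem.Set.union (PySem.Set.ofList (PySem.List.pyRange 1 half 2))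
      (PySem.Set.ofList (PySem.List.pyRange (size - 2) half (-2)))
  (PySem.List.pyRange 0 size 1).foldl
    (fun grid y =>
      let ey := PySem.Int.floordiv (size - 1) 2 - PySem.Int.floordiv (min y (size - 1 - y)) 2
      let row := (PySem.List.pyRange 0 size 1).foldl
        (fun row x =>
          let v := pvPow factor (ey - PySem.Int.floordiv (min x (size - 1 - x)) 2)
          let v := if PySem.Set.contains neg y then -v else v
          let v := if PySem.Set.contains neg x ∧ v > 0 then -v else v
          row ++ [v]) []
      grid ++ [row]) []

-- ===== PRECONDITION & SPEC =====
-- Pre_ excludes exactly the inputs on which A raises: sizes ≡ 1 (mod 4), ≥ 5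
-- (IndexError in PART 2) and factor = 0 with size ≥ 4 (ZeroDivisionError in PART 1).
def Pre_createTab (factor : Int) (size : Int) : Prop :=
  ¬(size % 4 = 1 ∧ 5 ≤ size) ∧ ¬(factor = 0 ∧ 4 ≤ size)
instance (factor : Int) (size : Int) : Decidable (Pre_createTab factor size) := by
  unfold Pre_createTab; infer_instance
def pvWitness_createTab : Int × Int := (3, 10)

-- On odd sizes ≥ 1 A returns an accidental grid ([] for size 1; for sizes ≡ 3 mod 4 an
-- asymmetric grid produced by negative-index wraparound and a skewed row mapping);
-- B returns the symmetric power-spot grid, the evident intent of the function.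
def D_createTab (factor : Int) (size : Int) : Prop := size % 2 = 1 ∧ 1 ≤ size
instance (factor : Int) (size : Int) : Decidable (D_createTab factor size) := by
  unfold D_createTab; infer_instance

def Spec_createTab (factor : Int) (size : Int) (out : List (List Int)) : Prop :=
  ¬ D_createTab factor size → out = createTab_alt factor size
instance (factor : Int) (size : Int) (out : List (List Int)) :
    Decidable (Spec_createTab factor size out) := by unfold Spec_createTab; infer_instance

def pvDiffWitness_createTab : Int × Int := (3, 1)
def pvDiffWitnessOut_createTab : (List (List Int)) × (List (List Int)) := ([], [[1]])

-- ===== CLAIM =====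
def Claim_unchanged_createTab : Prop := ∀ (factor : Int) (size : Int),
  Dom_createTab factor size → Pre_createTab factor size →
    Spec_createTab factor size (createTab factor size)
def Claim_changed_createTab : Prop :=
  Dom_createTab (pvDiffWitness_createTab.1) (pvDiffWitness_createTab.2) ∧
  Pre_createTab (pvDiffWitness_createTab.1) (pvDiffWitness_createTab.2) ∧
  D_createTab (pvDiffWitness_createTab.1) (pvDiffWitness_createTab.2) ∧
  createTab (pvDiffWitness_createTab.1) (pvDiffWitness_createTab.2) = pvDiffWitnessOut_createTab.1 ∧
  createTab_alt (pvDiffWitness_createTab.1) (pvDiffWitness_createTab.2) = pvDiffWitnessOut_createTab.2 ∧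
  pvDiffWitnessOut_createTab.1 ≠ pvDiffWitnessOut_createTab.2
-- ===== LEMMAS AND PROOFS =====

-- target normal form: the symmetric power-spot grid, used as common value of both ports
def pvNeg (n i : Nat) : Bool :=
  (decide (i % 2 = 1) && decide (i < n / 2)) ||
  (decide (i % 2 = 0) && decide (n / 2 < i) && decide (i + 2 ≤ n))

def pvCell (f : Int) (n y x : Nat) : Int :=
  let m := f ^ (n / 2 - 1 - (min y (n - 1 - y)) / 2 - (min x (n - 1 - x)) / 2)
  let v := if pvNeg n y then -m else m
  if pvNeg n x ∧ v > 0 then -v else v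

def pvRowT (f : Int) (n e0 : Nat) : List Int :=
  (List.range n).map (fun x => f ^ (e0 - (min x (n - 1 - x)) / 2))

def pvBase (f : Int) (n : Nat) : List (List Int) :=
  (List.range n).map (fun y => pvRowT f n (n / 2 - 1 - (min y (n - 1 - y)) / 2))

def pvGrid (f : Int) (n : Nat) : List (List Int) :=
  (List.range n).map (fun y => (List.range n).map (fun x => pvCell f n y x))

-- cast helpers
lemma pv_fdiv2 (m : Nat) : PySem.Int.floordiv (m : Int) 2 = ((m / 2 : Nat) : Int) := by
  exact_mod_cast PySem.Int.floordiv_natCast m 2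

lemma pv_fdiv4 (m : Nat) : PySem.Int.floordiv (m : Int) 4 = ((m / 4 : Nat) : Int) := by
  exact_mod_cast PySem.Int.floordiv_natCast m 4

lemma pv_mod2 (m : Nat) : PySem.Int.mod (m : Int) 2 = ((m % 2 : Nat) : Int) := by
  exact_mod_cast PySem.Int.mod_natCast m 2

-- exact power division: f**(e+1) // f = f**e
lemma pvPow_div (f : Int) (hf : f ≠ 0) (e : Nat) :
    PySem.Int.floordiv (f ^ (e + 1)) f = f ^ e := by
  have h := PySem.Int.floordiv_mul_add_mod (f ^ (e + 1)) f
  have hm : PySem.Int.mod (f ^ (e + 1)) f = 0 := by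
    rw [PySem.Int.mod_eq_zero_iff_dvd]
    exact ⟨f ^ e, by ring⟩
  rw [hm, add_zero] at h
  have : PySem.Int.floordiv (f ^ (e + 1)) f * f = f ^ e * f := by
    rw [h]; ring
  exact mul_right_cancel₀ hf this

-- step-2 / step-(-2) ranges as maps over List.range
lemma pvRange2 (a b : Int) :
    PySem.List.pyRange a b 2 =
      (List.range (if a < b then ((b - a + 1) / 2).toNat else 0)).map
        (fun (k : Nat) => a + 2 * (k : Int)) := by
  rw [PySem.List.pyRange_of_pos a b (by norm_num)]
  have : b - a + 2 - 1 = b - a + 1 := by ring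
  rw [this]

lemma pvRangeNeg2 (a b : Int) :
    PySem.List.pyRange a b (-2) =
      (List.range (if b < a then ((a - b + 1) / 2).toNat else 0)).map
        (fun (k : Nat) => a + (-2) * (k : Int)) := by
  show (if (-2 : Int) = 0 then _ else _) = _
  rw [if_neg (by norm_num)]
  have h1 : ¬ ((0:Int) < -2) := by norm_num
  simp only [h1, if_false]
  have h2 : a - b + -(-2) - 1 = a - b + 1 := by ring
  have h3 : -(-2 : Int) = 2 := by norm_num
  rw [h2, h3]

lemma pvRange2_nil (a b : Int) (h : b ≤ a) : PySem.List.pyRange a b 2 = [] := by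
  rw [pvRange2, if_neg (by omega)]; rfl

lemma pvRangeNeg2_nil (a b : Int) (h : a ≤ b) : PySem.List.pyRange a b (-2) = [] := by
  rw [pvRangeNeg2, if_neg (by omega)]; rfl

lemma pvRange1_zero (n : Nat) :
    PySem.List.pyRange 0 (n : Int) 1 = (List.range n).map (fun (k : Nat) => (k : Int)) := by
  rw [PySem.List.pyRange_one]
  simp

-- membership in the bands
lemma pvMem2 (h : Nat) (y : Int) :
    y ∈ PySem.List.pyRange 1 (h : Int) 2 ↔ 1 ≤ y ∧ y < (h : Int) ∧ (2 : Int) ∣ y - 1 :=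
  PySem.List.mem_pyRange_iff_of_pos (by norm_num) y

lemma pvMemNeg2 (a b y : Int) :
    y ∈ PySem.List.pyRange a b (-2) ↔ b < y ∧ y ≤ a ∧ (2 : Int) ∣ a - y := by
  rw [pvRangeNeg2]
  constructor
  · intro hy
    rcases List.mem_map.1 hy with ⟨k, hk, rfl⟩
    rw [List.mem_range] at hk
    by_cases hba : b < a
    · rw [if_pos hba] at hk
      refine ⟨by omega, by omega, ⟨(k : Int), by ring⟩⟩
    · rw [if_neg hba] at hk; omega
  · rintro ⟨h1, h2, c, hc⟩
    refine List.mem_map.2 ⟨c.toNat, ?_, ?_⟩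
    · rw [List.mem_range, if_pos (by omega)]; omega
    · omega

-- the bands have no duplicates
lemma pvNodup2 (a b : Int) : (PySem.List.pyRange a b 2).Nodup := by
  rw [pvRange2]
  exact (List.nodup_range).map (fun i j hij => by omega)

lemma pvNodupNeg2 (a b : Int) : (PySem.List.pyRange a b (-2)).Nodup := by
  rw [pvRangeNeg2]
  exact (List.nodup_range).map (fun i j hij => by omega)

lemma pvBoolExt {a b : Bool} (h : a = true ↔ b = true) : a = b := by
  cases a <;> cases b <;> simp_all

-- A and B both return [] for size ≤ 0
lemma pvA_nil (f s : Int) (hs : s ≤ 0) : createTab f s = [] := by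
  have e1 : PySem.Int.floordiv s 2 = s / 2 := PySem.Int.floordiv_eq_ediv_of_pos (by norm_num)
  simp only [createTab, pvA_part2, e1]
  rw [pvRange2_nil 0 (s / 2) (by omega), pvRange2_nil (s / 2 + 1) s (by omega),
    pvRange2_nil 1 (s / 2) (by omega), pvRangeNeg2_nil (s - 2) (s / 2) (by omega)]
  simp

lemma pvB_nil (f s : Int) (hs : s ≤ 0) : createTab_alt f s = [] := by
  simp only [createTab_alt]
  rw [PySem.List.pyRange_one_eq_nil (by omega)]
  simp

-- membership in B's negative-band set agrees with pvNeg
lemma pvContains (n : Nat) (hn : n % 2 = 0) (i : Nat) (hi : i < n) :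
    PySem.Set.contains
      (PySem.Set.union (PySem.Set.ofList (PySem.List.pyRange 1 ((n / 2 : Nat) : Int) 2))
        (PySem.Set.ofList (PySem.List.pyRange ((n : Int) - 2) ((n / 2 : Nat) : Int) (-2))))
      ((i : Nat) : Int) = pvNeg n i := by
  apply pvBoolExt
  have hmem : ∀ (t : PySem.Set Int) (x : Int), t.contains x = true ↔ x ∈ t := by
    intro t x
    exact List.contains_iff_mem
  rw [hmem, PySem.Set.mem_union, PySem.Set.mem_ofList, PySem.Set.mem_ofList,
    pvMem2, pvMemNeg2]
  unfold pvNeg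
  simp only [Bool.or_eq_true, Bool.and_eq_true, decide_eq_true_eq]
  omega

-- B computes the symmetric grid (even sizes)
lemma pvB_eq (f : Int) (n : Nat) (hn : n % 2 = 0) :
    createTab_alt f (n : Int) = pvGrid f n := by
  simp only [createTab_alt, pv_fdiv2]
  rw [PySem.List.foldl_append_singleton_eq_map]
  rw [pvRange1_zero, List.map_map, List.nil_append]
  unfold pvGrid
  apply List.map_congr_left
  intro y hy
  rw [List.mem_range] at hy
  simp only [Function.comp]
  rw [PySem.List.foldl_append_singleton_eq_map, List.nil_append, List.map_map]
  apply List.map_congr_left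
  intro x hx
  rw [List.mem_range] at hx
  simp only [Function.comp]
  rw [pvContains n hn y hy, pvContains n hn x hx]
  have hy' : ((n : Int) - 1 - (y : Nat)) = ((n - 1 - y : Nat) : Int) := by omega
  have hx' : ((n : Int) - 1 - (x : Nat)) = ((n - 1 - x : Nat) : Int) := by omega
  have hn1 : ((n : Int) - 1) = ((n - 1 : Nat) : Int) := by omega
  rw [hy', hx', hn1]
  rw [show (min ((y : Nat) : Int) ((n - 1 - y : Nat) : Int)) = ((min y (n - 1 - y) : Nat) : Int) by push_cast; rfl]
  rw [show (min ((x : Nat) : Int) ((n - 1 - x : Nat) : Int)) = ((min x (n - 1 - x) : Nat) : Int) by push_cast; rfl]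
  rw [pv_fdiv2, pv_fdiv2, pv_fdiv2]
  unfold pvCell pvPow
  have he : (((n - 1) / 2 : Nat) : Int) - ((min y (n - 1 - y) / 2 : Nat) : Int)
      - ((min x (n - 1 - x) / 2 : Nat) : Int)
      = ((n / 2 - 1 - (min y (n - 1 - y)) / 2 - (min x (n - 1 - x)) / 2 : Nat) : Int) := by
    omega
  rw [he, Int.toNat_natCast]

-- invariant of A's PART 1 first for-loop
lemma pvTab1L (f : Int) (n : Nat) (hn : n % 2 = 0) (hf : 4 ≤ n → f ≠ 0)
    (e0 : Nat) (hlo : n / 2 / 2 ≤ e0) :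
    ∀ m, m ≤ (n / 2 + 1) / 2 →
      (List.range m).foldl
        (fun (st : List Int × Int) (k : Nat) => pvA_tab1Step1 f (n : Int) st (0 + 2 * (k : Int)))
        ([], f ^ e0)
      = ((List.range (2 * m)).map (fun x => f ^ (e0 - x / 2)), f ^ (e0 - min m (n / 2 / 2))) := by
  intro m
  induction m with
  | zero => intro _; simp
  | succ m ih =>
    intro hm
    rw [List.range_succ, List.foldl_append, ih (by omega), List.foldl_cons, List.foldl_nil]
    have hminm : min m (n / 2 / 2) = m := by omega
    rw [hminm]
    unfold pvA_tab1Step1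
    simp only [pv_fdiv2, pv_mod2, hn, Nat.cast_zero]
    simp only [or_true, if_true]
    have hL : ∀ (F : Nat → Int),
        (List.range (2 * (m + 1))).map F = ((List.range (2 * m)).map F ++ [F (2 * m)]) ++ [F (2 * m + 1)] := by
      intro F
      rw [show 2 * (m + 1) = (2 * m + 1) + 1 by omega, List.range_succ, List.range_succ]
      simp
    simp only [Prod.mk.injEq]
    by_cases hc : m < n / 2 / 2
    · rw [if_pos (by push_cast; omega : (0 : Int) + 2 * (m : Int) < ((n / 2 : Nat) : Int) - 1)]
      refine ⟨?_, ?_⟩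
      · rw [hL]
        rw [show e0 - 2 * m / 2 = e0 - m by omega, show e0 - (2 * m + 1) / 2 = e0 - m by omega]
      · rw [show e0 - m = (e0 - (m + 1)) + 1 by omega, pvPow_div f (hf (by omega))]
        congr 1; omega
    · rw [if_neg (by push_cast; omega : ¬ ((0 : Int) + 2 * (m : Int) < ((n / 2 : Nat) : Int) - 1))]
      refine ⟨?_, ?_⟩
      · rw [hL]
        rw [show e0 - 2 * m / 2 = e0 - m by omega, show e0 - (2 * m + 1) / 2 = e0 - m by omega]
      · congr 1; omega

-- invariant of A's PART 1 second for-loop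
lemma pvTab1R (f : Int) (a : Int) :
    ∀ (R : Nat) (t0 : List Int) (e1 : Nat),
      (List.range R).foldl
        (fun (st : List Int × Int) (k : Nat) => pvA_tab1Step2 f st (a + 2 * (k : Int)))
        (t0, f ^ e1)
      = (t0 ++ (List.range (2 * R)).map (fun x => f ^ (e1 + x / 2)), f ^ (e1 + R)) := by
  intro R
  induction R with
  | zero => intro t0 e1; simp
  | succ R ih =>
    intro t0 e1
    rw [List.range_succ, List.foldl_append, ih, List.foldl_cons, List.foldl_nil]
    unfold pvA_tab1Step2
    simp only [Prod.mk.injEq]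
    refine ⟨?_, ?_⟩
    · rw [show (List.range (2 * (R + 1))).map (fun x => f ^ (e1 + x / 2))
          = ((List.range (2 * R)).map (fun x => f ^ (e1 + x / 2)) ++ [f ^ (e1 + (2 * R) / 2)])
            ++ [f ^ (e1 + (2 * R + 1) / 2)] by
        rw [show 2 * (R + 1) = (2 * R + 1) + 1 by omega, List.range_succ, List.range_succ]; simp]
      rw [show e1 + (2 * R) / 2 = e1 + R by omega, show e1 + (2 * R + 1) / 2 = e1 + R by omega]
      simp
    · rw [← pow_succ]
      congr 1

-- A, PART 1 inner: one template row
lemma pvTab1_eq (f : Int) (n : Nat) (hn : n % 2 = 0) (h2 : 2 ≤ n) (hf : 4 ≤ n → f ≠ 0)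
    (e0 : Nat) (hlo : n / 2 / 2 ≤ e0) (hhi : e0 ≤ n / 2 - 1) :
    pvA_tab1 f (n : Int) ((e0 : Nat) : Int) = pvRowT f n e0 := by
  simp only [pvA_tab1, pv_fdiv2]
  have hp : pvPow f ((e0 : Nat) : Int) = f ^ e0 := by simp [pvPow]
  rw [hp, pvRange2 0 ((n / 2 : Nat) : Int)]
  rw [show (if (0 : Int) < ((n / 2 : Nat) : Int)
      then ((((n / 2 : Nat) : Int) - 0 + 1) / 2).toNat else 0) = (n / 2 + 1) / 2 by
    split_ifs with h' <;> omega]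
  rw [List.foldl_map]
  rw [pvTab1L f n hn hf e0 hlo ((n / 2 + 1) / 2) le_rfl]
  rw [show min ((n / 2 + 1) / 2) (n / 2 / 2) = n / 2 / 2 by omega]
  rw [pvRange2 (((n / 2 : Nat) : Int) + 1) (n : Int)]
  rw [show (if ((n / 2 : Nat) : Int) + 1 < (n : Int)
      then (((n : Int) - (((n / 2 : Nat) : Int) + 1) + 1) / 2).toNat else 0) = n / 2 / 2 by
    split_ifs with h' <;> omega]
  rw [List.foldl_map]
  rw [← pow_succ f (e0 - n / 2 / 2)]
  rw [pvTab1R f (((n / 2 : Nat) : Int) + 1) (n / 2 / 2)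
    ((List.range (2 * ((n / 2 + 1) / 2))).map (fun x => f ^ (e0 - x / 2))) (e0 - n / 2 / 2 + 1)]
  unfold pvRowT
  have hr : List.range n = List.range (2 * ((n / 2 + 1) / 2))
      ++ List.map (fun i => 2 * ((n / 2 + 1) / 2) + i) (List.range (2 * (n / 2 / 2))) := by
    have h : List.range (2 * ((n / 2 + 1) / 2) + 2 * (n / 2 / 2))
        = List.range (2 * ((n / 2 + 1) / 2))
          ++ List.map (fun i => 2 * ((n / 2 + 1) / 2) + i) (List.range (2 * (n / 2 / 2))) :=
      List.range_add
    rw [show 2 * ((n / 2 + 1) / 2) + 2 * (n / 2 / 2) = n by omega] at h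
    exact h
  rw [hr, List.map_append, List.map_map]
  dsimp only
  congr 1
  · apply List.map_congr_left; intro x hx; rw [List.mem_range] at hx
    congr 1; omega
  · apply List.map_congr_left; intro x hx; rw [List.mem_range] at hx
    simp only [Function.comp]
    congr 1; omega

-- A, PART 1 while loop, generalized over the loop counter
lemma pvPart1_aux (f : Int) (n : Nat) (hn : n % 2 = 0) (h2 : 2 ≤ n) (hf : 4 ≤ n → f ≠ 0) :
    ∀ (d m : Nat), m + d = (n / 2 + 1) / 2 → ∀ (acc : List (List Int)),
      pvA_part1 f (n : Int) (((n / 2 : Nat) : Int) - 1 - (m : Int)) ((2 * m : Nat) : Int) acc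
      = acc ++ (List.range d).map (fun k => pvRowT f n (n / 2 - 1 - (m + k))) := by
  intro d
  induction d with
  | zero =>
    intro m hm acc
    rw [pvA_part1]
    rw [dif_neg (by rw [pv_fdiv2]; push_cast; omega)]
    simp
  | succ d ih =>
    intro m hm acc
    rw [pvA_part1]
    rw [dif_pos (by rw [pv_fdiv2]; push_cast; omega)]
    rw [show ((n / 2 : Nat) : Int) - 1 - (m : Int) = ((n / 2 - 1 - m : Nat) : Int) by omega]
    rw [pvTab1_eq f n hn h2 hf (n / 2 - 1 - m) (by omega) (by omega)]
    rw [show ((n / 2 - 1 - m : Nat) : Int) - 1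
        = ((n / 2 : Nat) : Int) - 1 - ((m + 1 : Nat) : Int) by omega]
    rw [show ((2 * m : Nat) : Int) + 2 = ((2 * (m + 1) : Nat) : Int) by push_cast; ring]
    rw [ih (m + 1) (by omega)]
    rw [List.append_assoc]
    congr 1
    rw [List.range_succ_eq_map]
    simp only [List.map_cons, List.map_map, List.singleton_append]
    refine congrArg₂ List.cons ?_ ?_
    · congr 1 <;> omega
    · apply List.map_congr_left; intro k hk
      simp only [Function.comp]
      congr 1 <;> omega

-- A, PART 1 while loop
lemma pvPart1_eq (f : Int) (n : Nat) (hn : n % 2 = 0) (h2 : 2 ≤ n) (hf : 4 ≤ n → f ≠ 0) :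
    pvA_part1 f (n : Int) ((n / 2 : Nat) - 1) 0 [] =
      (List.range ((n / 2 + 1) / 2)).map (fun k => pvRowT f n (n / 2 - 1 - k)) := by
  have h := pvPart1_aux f n hn h2 hf ((n / 2 + 1) / 2) 0 (by omega) []
  simpa using h

-- invariant of A's PART 2 first loop
lemma pvP2L (f : Int) (n : Nat) (hn : n % 2 = 0) :
    ∀ m, m ≤ (n / 2 + 1) / 2 →
      (List.range m).foldl
        (fun (st : List (List Int) × Int) (k : Nat) =>
          pvA_p2Step1 (n : Int)
            ((List.range ((n / 2 + 1) / 2)).map (fun k => pvRowT f n (n / 2 - 1 - k)))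
            st (0 + 2 * (k : Int)))
        ([], 0)
      = ((List.range (2 * m)).map (fun y => pvRowT f n (n / 2 - 1 - y / 2)), (m : Int)) := by
  intro m
  induction m with
  | zero => intro _; simp
  | succ m ih =>
    intro hm
    rw [List.range_succ, List.foldl_append, ih (by omega), List.foldl_cons, List.foldl_nil]
    unfold pvA_p2Step1
    simp only [pv_fdiv2, pv_mod2, hn, Nat.cast_zero, or_true, if_true]
    have hTm : PySem.List.pyGetD
        ((List.range ((n / 2 + 1) / 2)).map (fun k => pvRowT f n (n / 2 - 1 - k))) (m : Int) []
        = pvRowT f n (n / 2 - 1 - m) := by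
      rw [PySem.List.pyGetD_natCast]
      rw [List.getD_eq_getElem _ _ (by simpa using by omega : m < ((List.range ((n / 2 + 1) / 2)).map (fun k => pvRowT f n (n / 2 - 1 - k))).length)]
      simp
    rw [hTm]
    simp only [Prod.mk.injEq]
    refine ⟨?_, by push_cast; ring⟩
    rw [show (List.range (2 * (m + 1))).map (fun y => pvRowT f n (n / 2 - 1 - y / 2))
        = ((List.range (2 * m)).map (fun y => pvRowT f n (n / 2 - 1 - y / 2))
            ++ [pvRowT f n (n / 2 - 1 - (2 * m) / 2)]) ++ [pvRowT f n (n / 2 - 1 - (2 * m + 1) / 2)] by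
      rw [show 2 * (m + 1) = (2 * m + 1) + 1 by omega, List.range_succ, List.range_succ]; simp]
    rw [show n / 2 - 1 - 2 * m / 2 = n / 2 - 1 - m by omega,
      show n / 2 - 1 - (2 * m + 1) / 2 = n / 2 - 1 - m by omega]

-- invariant of A's PART 2 second loop
lemma pvP2R (f : Int) (n : Nat) (hn : n % 2 = 0) (a : Int) :
    ∀ m, m ≤ n / 2 / 2 → ∀ (G0 : List (List Int)),
      (List.range m).foldl
        (fun (st : List (List Int) × Int) (k : Nat) =>
          pvA_p2Step2
            ((List.range ((n / 2 + 1) / 2)).map (fun k => pvRowT f n (n / 2 - 1 - k)))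
            st (a + 2 * (k : Int)))
        (G0, ((n / 4 : Nat) : Int) - 1)
      = (G0 ++ (List.range (2 * m)).map
            (fun i => pvRowT f n (n / 2 - 1 - (n / 4 - 1 - i / 2))),
          ((n / 4 : Nat) : Int) - 1 - (m : Int)) := by
  intro m
  induction m with
  | zero => intro _ G0; simp
  | succ m ih =>
    intro hm G0
    rw [List.range_succ, List.foldl_append, ih (by omega) G0, List.foldl_cons, List.foldl_nil]
    unfold pvA_p2Step2
    dsimp only
    have hidx : ((n / 4 : Nat) : Int) - 1 - (m : Int) = ((n / 4 - 1 - m : Nat) : Int) := by omega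
    have hTm : PySem.List.pyGetD
        ((List.range ((n / 2 + 1) / 2)).map (fun k => pvRowT f n (n / 2 - 1 - k)))
        (((n / 4 : Nat) : Int) - 1 - (m : Int)) []
        = pvRowT f n (n / 2 - 1 - (n / 4 - 1 - m)) := by
      rw [hidx, PySem.List.pyGetD_natCast]
      rw [List.getD_eq_getElem _ _ (by simpa using by omega : n / 4 - 1 - m < ((List.range ((n / 2 + 1) / 2)).map (fun k => pvRowT f n (n / 2 - 1 - k))).length)]
      simp
    rw [hTm]
    simp only [Prod.mk.injEq]
    refine ⟨?_, by push_cast; ring⟩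
    rw [show (List.range (2 * (m + 1))).map (fun i => pvRowT f n (n / 2 - 1 - (n / 4 - 1 - i / 2)))
        = ((List.range (2 * m)).map (fun i => pvRowT f n (n / 2 - 1 - (n / 4 - 1 - i / 2)))
            ++ [pvRowT f n (n / 2 - 1 - (n / 4 - 1 - (2 * m) / 2))])
          ++ [pvRowT f n (n / 2 - 1 - (n / 4 - 1 - (2 * m + 1) / 2))] by
      rw [show 2 * (m + 1) = (2 * m + 1) + 1 by omega, List.range_succ, List.range_succ]; simp]
    rw [show n / 4 - 1 - 2 * m / 2 = n / 4 - 1 - m by omega,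
      show n / 4 - 1 - (2 * m + 1) / 2 = n / 4 - 1 - m by omega]
    simp [List.append_assoc]

-- A, PART 2
lemma pvPart2_eq (f : Int) (n : Nat) (hn : n % 2 = 0) (h2 : 2 ≤ n) (hf : 4 ≤ n → f ≠ 0) :
    pvA_part2 f (n : Int) = pvBase f n := by
  simp only [pvA_part2, pv_fdiv2, pv_fdiv4]
  rw [pvPart1_eq f n hn h2 hf]
  rw [pvRange2 0 ((n / 2 : Nat) : Int)]
  rw [show (if (0 : Int) < ((n / 2 : Nat) : Int)
      then ((((n / 2 : Nat) : Int) - 0 + 1) / 2).toNat else 0) = (n / 2 + 1) / 2 by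
    split_ifs with h' <;> omega]
  rw [List.foldl_map]
  rw [pvP2L f n hn ((n / 2 + 1) / 2) le_rfl]
  dsimp only
  rw [pvRange2 (((n / 2 : Nat) : Int) + 1) (n : Int)]
  rw [show (if ((n / 2 : Nat) : Int) + 1 < (n : Int)
      then (((n : Int) - (((n / 2 : Nat) : Int) + 1) + 1) / 2).toNat else 0) = n / 2 / 2 by
    split_ifs with h' <;> omega]
  rw [List.foldl_map]
  rw [pvP2R f n hn (((n / 2 : Nat) : Int) + 1) (n / 2 / 2) le_rfl]
  dsimp only
  unfold pvBase
  have hr : List.range n = List.range (2 * ((n / 2 + 1) / 2))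
      ++ List.map (fun i => 2 * ((n / 2 + 1) / 2) + i) (List.range (2 * (n / 2 / 2))) := by
    have h : List.range (2 * ((n / 2 + 1) / 2) + 2 * (n / 2 / 2))
        = List.range (2 * ((n / 2 + 1) / 2))
          ++ List.map (fun i => 2 * ((n / 2 + 1) / 2) + i) (List.range (2 * (n / 2 / 2))) :=
      List.range_add
    rw [show 2 * ((n / 2 + 1) / 2) + 2 * (n / 2 / 2) = n by omega] at h
    exact h
  rw [hr, List.map_append, List.map_map]
  congr 1
  · apply List.map_congr_left; intro y hy; rw [List.mem_range] at hy
    congr 1; omega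
  · apply List.map_congr_left; intro i hi; rw [List.mem_range] at hi
    simp only [Function.comp]
    congr 1; omega

-- setting an entry back to itself
lemma pvSetSelf (G : List (List Int)) (y : Nat) (hy : y < G.length) :
    G.set y (G.getD y []) = G := by
  apply List.ext_getElem (by simp)
  intro i h1 h2
  rw [List.getElem_set]
  split_ifs with h
  · subst h; rw [List.getD_eq_getElem _ _ hy]
  · rfl

lemma pvGetDSet (G : List (List Int)) (m i : Nat) (v : List Int) (hi : i < G.length) :
    (G.set m v).getD i [] = if m = i then v else G.getD i [] := by
  rw [List.getD_eq_getElem _ _ (by simpa using hi), List.getElem_set]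
  split_ifs with h
  · rfl
  · rw [List.getD_eq_getElem _ _ hi]

lemma pvGetDSetRow (r : List Int) (m i : Nat) (v : Int) (hi : i < r.length) :
    (r.set m v).getD i 0 = if m = i then v else r.getD i 0 := by
  rw [List.getD_eq_getElem _ _ (by simpa using hi), List.getElem_set]
  split_ifs with h
  · rfl
  · rw [List.getD_eq_getElem _ _ hi]

-- row-level inner loop of a PART 3 row pass
lemma pvRowFoldLen (l : List Int) :
    ∀ (r : List Int),
      (l.foldl (fun r x => PySem.List.pySetD r x (PySem.List.pyGetD r x 0 * (-1))) r).length
        = r.length := by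
  induction l with
  | nil => intro r; rfl
  | cons x t ih => intro r; rw [List.foldl_cons, ih]; exact PySem.List.length_pySetD r x _

lemma pvRowFoldGetD (l : List Int) :
    l.Nodup → (∀ x ∈ l, 0 ≤ x) →
    ∀ (r : List Int) (i : Nat), i < r.length →
      (l.foldl (fun r x => PySem.List.pySetD r x (PySem.List.pyGetD r x 0 * (-1))) r).getD i 0
      = if (i : Int) ∈ l then r.getD i 0 * (-1) else r.getD i 0 := by
  induction l with
  | nil => intro _ _ r i hi; simp
  | cons x t ih =>
    intro hnd hpos r i hi
    rw [List.foldl_cons]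
    obtain ⟨m, rfl⟩ : ∃ m : Nat, x = (m : Int) :=
      ⟨x.toNat, by have := hpos x (by simp); omega⟩
    rw [PySem.List.pyGetD_natCast, PySem.List.pySetD_natCast]
    rw [ih hnd.of_cons (fun z hz => hpos z (by simp [hz])) _ i (by simpa using hi)]
    by_cases hmi : m = i
    · subst hmi
      have hnotin : ((m : Nat) : Int) ∉ t := by
        intro hc; exact (List.nodup_cons.1 hnd).1 hc
      rw [if_neg hnotin, if_pos (by simp), pvGetDSetRow r m m _ hi, if_pos rfl]
    · rw [pvGetDSetRow r m i _ hi, if_neg hmi]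
      by_cases hit : (i : Int) ∈ t
      · rw [if_pos hit, if_pos (by simp [hit])]
      · rw [if_neg hit, if_neg (by
          simp only [List.mem_cons, hit, or_false]
          intro hc; exact hmi (by omega))]

lemma pvRowNegAll (r : List Int) (n : Nat) (hlen : r.length = n) :
    (PySem.List.pyRange 0 (n : Int) 1).foldl
      (fun r x => PySem.List.pySetD r x (PySem.List.pyGetD r x 0 * (-1))) r
    = r.map (· * (-1)) := by
  apply List.ext_getElem (by rw [pvRowFoldLen]; simp)
  intro i h1 h2
  have hi : i < r.length := by rw [pvRowFoldLen] at h1; exact h1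
  have hchar := pvRowFoldGetD (PySem.List.pyRange 0 (n : Int) 1) (PySem.List.nodup_pyRange_one 0 (n : Int))
    (fun x hx => ((PySem.List.mem_pyRange_one).1 hx).1) r i hi
  rw [List.getD_eq_getElem _ _ h1] at hchar
  rw [hchar, if_pos ((PySem.List.mem_pyRange_one).2 ⟨by omega, by omega⟩)]
  rw [List.getElem_map, List.getD_eq_getElem _ _ hi]

-- a PART 3 row pass sets one whole row to its negation
lemma pvRowHoist (n : Nat) (l : List Int) :
    ∀ (G : List (List Int)) (y : Nat), y < G.length →
      l.foldl (fun ft x =>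
        PySem.List.pySetD ft ((y : Nat) : Int)
          (PySem.List.pySetD (PySem.List.pyGetD ft ((y : Nat) : Int) [])
            x (PySem.List.pyGetD (PySem.List.pyGetD ft ((y : Nat) : Int) []) x 0 * (-1)))) G
      = G.set y (l.foldl (fun r x => PySem.List.pySetD r x (PySem.List.pyGetD r x 0 * (-1)))
          (G.getD y [])) := by
  induction l with
  | nil => intro G y hy; rw [List.foldl_nil, List.foldl_nil, pvSetSelf G y hy]
  | cons x t ih =>
    intro G y hy
    rw [List.foldl_cons, List.foldl_cons]
    rw [PySem.List.pyGetD_natCast, PySem.List.pySetD_natCast]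
    rw [ih (G.set y _) y (by simpa using hy)]
    rw [List.set_set]
    congr 1
    rw [pvGetDSet _ y y _ (by simpa using hy), if_pos rfl]

lemma pvPassRow_eq (n : Nat) (G : List (List Int)) (y : Nat) (hy : y < G.length)
    (hrow : (G.getD y []).length = n) :
    pvA_passRow (n : Int) G ((y : Nat) : Int) = G.set y ((G.getD y []).map (· * (-1))) := by
  unfold pvA_passRow
  rw [pvRowHoist n _ G y hy, pvRowNegAll _ n hrow]

-- grid after a sequence of row passes
lemma pvRowsFoldLen (n : Nat) (ys : List Int) :
    ∀ (G : List (List Int)), (ys.foldl (pvA_passRow (n : Int)) G).length = G.length := by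
  induction ys with
  | nil => intro G; rfl
  | cons y t ih =>
    intro G
    rw [List.foldl_cons, ih]
    unfold pvA_passRow
    generalize PySem.List.pyRange 0 (n : Int) 1 = l
    induction l generalizing G with
    | nil => rfl
    | cons x u ihl => rw [List.foldl_cons, ihl]; exact PySem.List.length_pySetD G y _

lemma pvRowsFoldGetD (n : Nat) (ys : List Int) :
    ys.Nodup → ∀ (G : List (List Int)),
      (∀ y ∈ ys, ∃ m : Nat, y = (m : Int) ∧ m < G.length) →
      (∀ r ∈ G, r.length = n) →
      ∀ i, i < G.length →
        (ys.foldl (pvA_passRow (n : Int)) G).getD i []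
        = if (i : Int) ∈ ys then (G.getD i []).map (· * (-1)) else G.getD i [] := by
  induction ys with
  | nil => intro _ G _ _ i hi; simp
  | cons y t ih =>
    intro hnd G hys hrows i hi
    obtain ⟨m, rfl, hm⟩ := hys y (by simp)
    rw [List.foldl_cons]
    have hrowm : (G.getD m []).length = n := by
      apply hrows
      rw [List.getD_eq_getElem _ _ hm]
      exact List.getElem_mem hm
    rw [pvPassRow_eq n G m hm hrowm]
    rw [ih hnd.of_cons (G.set m _)
      (fun z hz => by
        obtain ⟨mz, rfl, hmz⟩ := hys z (by simp [hz])
        exact ⟨mz, rfl, by simpa using hmz⟩)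
      (fun r hr => by
        rcases List.mem_or_eq_of_mem_set hr with h | h
        · exact hrows r h
        · subst h; simpa using hrowm)
      i (by simpa using hi)]
    by_cases hmi : m = i
    · subst hmi
      have hnotin : ((m : Nat) : Int) ∉ t := (List.nodup_cons.1 hnd).1
      rw [if_neg hnotin, if_pos (by simp), pvGetDSet G m m _ hi, if_pos rfl]
    · rw [pvGetDSet G m i _ hi, if_neg hmi]
      by_cases hit : (i : Int) ∈ t
      · rw [if_pos hit, if_pos (by simp [hit])]
      · rw [if_neg hit, if_neg (by
          simp only [List.mem_cons, hit, or_false]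
          intro hc; exact hmi (by omega))]

-- one column-pass row update
def pvCU (xi : Int) (r : List Int) : List Int :=
  if PySem.List.pyGetD r xi 0 > 0 then
    PySem.List.pySetD r xi (PySem.List.pyGetD r xi 0 * (-1)) else r

lemma pvCULen (xi : Int) (r : List Int) : (pvCU xi r).length = r.length := by
  unfold pvCU
  split_ifs with h
  · exact PySem.List.length_pySetD r xi _
  · rfl

-- a PART 3 column pass applies pvCU to every row
lemma pvColFoldLen (xi : Int) (l : List Int) :
    ∀ (G : List (List Int)),
      (l.foldl (fun ft y =>
        if PySem.List.pyGetD (PySem.List.pyGetD ft y []) xi 0 > 0 then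
          PySem.List.pySetD ft y
            (PySem.List.pySetD (PySem.List.pyGetD ft y [])
              xi (PySem.List.pyGetD (PySem.List.pyGetD ft y []) xi 0 * (-1)))
        else ft) G).length = G.length := by
  induction l with
  | nil => intro G; rfl
  | cons x t ih =>
    intro G
    rw [List.foldl_cons, ih]
    split_ifs with h
    · exact PySem.List.length_pySetD G x _
    · rfl

lemma pvColFoldGetD (xi : Int) (l : List Int) :
    l.Nodup → (∀ x ∈ l, 0 ≤ x) →
    ∀ (G : List (List Int)) (i : Nat), i < G.length →
      (l.foldl (fun ft y =>
        if PySem.List.pyGetD (PySem.List.pyGetD ft y []) xi 0 > 0 then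
          PySem.List.pySetD ft y
            (PySem.List.pySetD (PySem.List.pyGetD ft y [])
              xi (PySem.List.pyGetD (PySem.List.pyGetD ft y []) xi 0 * (-1)))
        else ft) G).getD i []
      = if (i : Int) ∈ l then pvCU xi (G.getD i []) else G.getD i [] := by
  induction l with
  | nil => intro _ _ G i hi; simp
  | cons x t ih =>
    intro hnd hpos G i hi
    obtain ⟨m, rfl⟩ : ∃ m : Nat, x = (m : Int) :=
      ⟨x.toNat, by have := hpos x (by simp); omega⟩
    rw [List.foldl_cons]
    have hstep : (if PySem.List.pyGetD (PySem.List.pyGetD G ((m : Nat) : Int) []) xi 0 > 0 then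
          PySem.List.pySetD G ((m : Nat) : Int)
            (PySem.List.pySetD (PySem.List.pyGetD G ((m : Nat) : Int) [])
              xi (PySem.List.pyGetD (PySem.List.pyGetD G ((m : Nat) : Int) []) xi 0 * (-1)))
        else G) = G.set m (pvCU xi (G.getD m [])) := by
      rw [PySem.List.pyGetD_natCast]
      unfold pvCU
      split_ifs with h
      · rw [PySem.List.pySetD_natCast]
      · by_cases hm : m < G.length
        · rw [pvSetSelf G m hm]
        · rw [List.set_eq_of_length_le (by omega)]
    rw [hstep]
    rw [ih hnd.of_cons (fun z hz => hpos z (by simp [hz])) _ i (by simpa using hi)]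
    by_cases hmi : m = i
    · subst hmi
      have hnotin : ((m : Nat) : Int) ∉ t := (List.nodup_cons.1 hnd).1
      rw [if_neg hnotin, if_pos (by simp), pvGetDSet G m m _ hi, if_pos rfl]
    · rw [pvGetDSet G m i _ hi, if_neg hmi]
      by_cases hit : (i : Int) ∈ t
      · rw [if_pos hit, if_pos (by simp [hit])]
      · rw [if_neg hit, if_neg (by
          simp only [List.mem_cons, hit, or_false]
          intro hc; exact hmi (by omega))]

lemma pvPassCol_eq (n : Nat) (G : List (List Int)) (hG : G.length = n) (xi : Int) :
    pvA_passCol (n : Int) G xi = G.map (pvCU xi) := by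
  unfold pvA_passCol
  apply List.ext_getElem (by rw [pvColFoldLen]; simp)
  intro i h1 h2
  have hi : i < G.length := by rw [pvColFoldLen] at h1; exact h1
  have hchar := pvColFoldGetD xi (PySem.List.pyRange 0 (n : Int) 1)
    (PySem.List.nodup_pyRange_one 0 (n : Int))
    (fun x hx => ((PySem.List.mem_pyRange_one).1 hx).1) G i hi
  rw [List.getD_eq_getElem _ _ h1] at hchar
  rw [hchar, if_pos ((PySem.List.mem_pyRange_one).2 ⟨by omega, by omega⟩)]
  rw [List.getElem_map, List.getD_eq_getElem _ _ hi]

-- a sequence of column passes, row-wise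
lemma pvColsFold (n : Nat) (xs : List Int) :
    ∀ (G : List (List Int)), G.length = n →
      xs.foldl (pvA_passCol (n : Int)) G = G.map (fun r => xs.foldl (fun r x => pvCU x r) r) := by
  induction xs with
  | nil => intro G _; simp
  | cons x t ih =>
    intro G hG
    rw [List.foldl_cons, pvPassCol_eq n G hG x, ih _ (by simpa using hG), List.map_map]
    apply List.map_congr_left
    intro r _
    simp [Function.comp]

-- entry of a composed column-pass row update
lemma pvCUFold (xs : List Int) :
    (∀ x ∈ xs, 0 ≤ x) →
    ∀ (r : List Int) (j : Nat), j < r.length →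
      (xs.foldl (fun r x => pvCU x r) r).getD j 0
      = if (j : Int) ∈ xs then
          (if r.getD j 0 > 0 then r.getD j 0 * (-1) else r.getD j 0) else r.getD j 0 := by
  induction xs with
  | nil => intro _ r j hj; simp
  | cons x t ih =>
    intro hpos r j hj
    obtain ⟨m, rfl⟩ : ∃ m : Nat, x = (m : Int) :=
      ⟨x.toNat, by have := hpos x (by simp); omega⟩
    rw [List.foldl_cons]
    rw [ih (fun z hz => hpos z (by simp [hz])) _ j (by rw [pvCULen]; exact hj)]
    have hmemhead : ((m : Nat) : Int) ∈ ((m : Nat) : Int) :: t := by simp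
    by_cases hmj : m = j
    · subst hmj
      by_cases hv : r.getD m 0 > 0
      · have hCU : (pvCU ((m : Nat) : Int) r).getD m 0 = r.getD m 0 * (-1) := by
          unfold pvCU
          rw [PySem.List.pyGetD_natCast, if_pos hv, PySem.List.pySetD_natCast,
            pvGetDSetRow r m m _ hj, if_pos rfl]
        rw [hCU]
        by_cases hmt : ((m : Nat) : Int) ∈ t
        · rw [if_pos hmt, if_pos hmemhead,
            if_neg (by omega : ¬ (r.getD m 0 * -1 > 0)), if_pos hv]
        · rw [if_neg hmt, if_pos hmemhead, if_pos hv]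
      · have hCU : (pvCU ((m : Nat) : Int) r).getD m 0 = r.getD m 0 := by
          unfold pvCU
          rw [PySem.List.pyGetD_natCast, if_neg hv]
        rw [hCU]
        by_cases hmt : ((m : Nat) : Int) ∈ t
        · rw [if_pos hmt, if_pos hmemhead]
        · rw [if_neg hmt, if_pos hmemhead, if_neg hv]
    · have hCU : (pvCU ((m : Nat) : Int) r).getD j 0 = r.getD j 0 := by
        unfold pvCU
        rw [PySem.List.pyGetD_natCast]
        split_ifs with h
        · rw [PySem.List.pySetD_natCast, pvGetDSetRow r m j _ hj, if_neg hmj]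
        · rfl
      rw [hCU]
      by_cases hjt : (j : Int) ∈ t
      · rw [if_pos hjt, if_pos (show (j : Int) ∈ ((m : Nat) : Int) :: t from by simp [hjt])]
      · rw [if_neg hjt, if_neg (by
          simp only [List.mem_cons, hjt, or_false]
          intro hc; exact hmj (by omega))]

lemma pvCUFoldLen (xs : List Int) :
    ∀ (r : List Int), (xs.foldl (fun r x => pvCU x r) r).length = r.length := by
  induction xs with
  | nil => intro r; rfl
  | cons x t ih => intro r; rw [List.foldl_cons, ih, pvCULen]

lemma pvRowT_getD (f : Int) (n e0 j : Nat) (hj : j < n) :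
    (pvRowT f n e0).getD j 0 = f ^ (e0 - (min j (n - 1 - j)) / 2) := by
  unfold pvRowT
  rw [List.getD_eq_getElem _ _ (by simpa using hj), List.getElem_map, List.getElem_range]

lemma pvBase_getD (f : Int) (n i : Nat) (hi : i < n) :
    (pvBase f n).getD i [] = pvRowT f n (n / 2 - 1 - (min i (n - 1 - i)) / 2) := by
  unfold pvBase
  rw [List.getD_eq_getElem _ _ (by simpa using hi), List.getElem_map, List.getElem_range]

lemma pvMemRYIff (n : Nat) (hn : n % 2 = 0) (i : Nat) (hi : i < n) :
    ((i : Nat) : Int) ∈ PySem.List.pyRange 1 ((n / 2 : Nat) : Int) 2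
        ++ PySem.List.pyRange ((n : Int) - 2) ((n / 2 : Nat) : Int) (-2)
      ↔ pvNeg n i = true := by
  rw [List.mem_append, pvMem2, pvMemNeg2]
  unfold pvNeg
  simp only [Bool.or_eq_true, Bool.and_eq_true, decide_eq_true_eq]
  omega

-- A = symmetric grid on even sizes
lemma pvA_eq (f : Int) (n : Nat) (hn : n % 2 = 0) (h2 : 2 ≤ n) (hf : 4 ≤ n → f ≠ 0) :
    createTab f (n : Int) = pvGrid f n := by
  simp only [createTab, pv_fdiv2]
  rw [pvPart2_eq f n hn h2 hf]
  rw [← List.foldl_append, ← List.foldl_append]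
  set RY : List Int := PySem.List.pyRange 1 ((n / 2 : Nat) : Int) 2
      ++ PySem.List.pyRange ((n : Int) - 2) ((n / 2 : Nat) : Int) (-2) with hRY
  have hmemRY : ∀ y : Int, y ∈ RY ↔
      ((1 ≤ y ∧ y < ((n / 2 : Nat) : Int) ∧ (2 : Int) ∣ y - 1) ∨
        (((n / 2 : Nat) : Int) < y ∧ y ≤ (n : Int) - 2 ∧ (2 : Int) ∣ (n : Int) - 2 - y)) := by
    intro y
    rw [hRY, List.mem_append, pvMem2, pvMemNeg2]
  have hposRY : ∀ y ∈ RY, 0 ≤ y := by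
    intro y hy
    rcases (hmemRY y).1 hy with h | h <;> omega
  have hnodupRY : RY.Nodup := by
    rw [hRY]
    refine (pvNodup2 _ _).append (pvNodupNeg2 _ _) ?_
    intro y hy1 hy2
    rw [pvMem2] at hy1
    rw [pvMemNeg2] at hy2
    omega
  have hBlen : (pvBase f n).length = n := by simp [pvBase]
  have hBrows : ∀ r ∈ pvBase f n, r.length = n := by
    intro r hr
    unfold pvBase at hr
    obtain ⟨y, _, rfl⟩ := List.mem_map.1 hr
    simp [pvRowT]
  have hG2len : (RY.foldl (pvA_passRow (n : Int)) (pvBase f n)).length = n := by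
    rw [pvRowsFoldLen, hBlen]
  rw [pvColsFold n RY _ hG2len]
  apply List.ext_getElem (by simp [hG2len, pvGrid])
  intro i h1 h2
  have hin : i < n := by simpa [hG2len] using h1
  have hG2getD := pvRowsFoldGetD n RY hnodupRY (pvBase f n)
    (fun y hy => ⟨y.toNat, by have := (hmemRY y).1 hy; constructor <;> omega⟩)
    hBrows i (by omega)
  rw [List.getElem_map]
  have hPG : (pvGrid f n)[i] = (List.range n).map (fun x => pvCell f n i x) := by
    unfold pvGrid
    rw [List.getElem_map, List.getElem_range]
  rw [hPG]
  have hG2i : (RY.foldl (pvA_passRow (n : Int)) (pvBase f n))[i]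
      = if (i : Int) ∈ RY then
          (pvRowT f n (n / 2 - 1 - (min i (n - 1 - i)) / 2)).map (· * (-1))
        else pvRowT f n (n / 2 - 1 - (min i (n - 1 - i)) / 2) := by
    rw [← List.getD_eq_getElem _ []
      (show i < (List.foldl (pvA_passRow (n : Int)) (pvBase f n) RY).length by omega),
      hG2getD, pvBase_getD f n i hin]
  rw [hG2i]
  have hni := pvMemRYIff n hn i hin
  have hrlen : (if (i : Int) ∈ RY then
          (pvRowT f n (n / 2 - 1 - (min i (n - 1 - i)) / 2)).map (· * (-1))
        else pvRowT f n (n / 2 - 1 - (min i (n - 1 - i)) / 2)).length = n := by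
    split_ifs <;> simp [pvRowT]
  apply List.ext_getElem (by rw [pvCUFoldLen, hrlen]; simp)
  intro j hj1 hj2
  have hjn : j < n := by rw [pvCUFoldLen, hrlen] at hj1; exact hj1
  have hnj := pvMemRYIff n hn j hjn
  rw [List.getElem_map, List.getElem_range]
  rw [← List.getD_eq_getElem _ 0 hj1]
  rw [pvCUFold RY hposRY _ j (by rw [hrlen]; exact hjn)]
  unfold pvCell
  by_cases hiRY : (i : Int) ∈ RY
  · have hni' : pvNeg n i = true := hni.1 hiRY
    have hw : (if (i : Int) ∈ RY then
          (pvRowT f n (n / 2 - 1 - (min i (n - 1 - i)) / 2)).map (· * (-1))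
        else pvRowT f n (n / 2 - 1 - (min i (n - 1 - i)) / 2)).getD j 0
        = -(f ^ (n / 2 - 1 - (min i (n - 1 - i)) / 2 - (min j (n - 1 - j)) / 2)) := by
      rw [if_pos hiRY, List.getD_eq_getElem _ _ (by simp [pvRowT]; omega),
        List.getElem_map, ← List.getD_eq_getElem _ 0 (by simp [pvRowT]; omega),
        pvRowT_getD f n _ j hjn, mul_neg_one]
    rw [hw]
    simp only [if_pos hni']
    by_cases hjRY : (j : Int) ∈ RY
    · have hnj' : pvNeg n j = true := hnj.1 hjRY
      by_cases hv : -(f ^ (n / 2 - 1 - (min i (n - 1 - i)) / 2 - (min j (n - 1 - j)) / 2)) > 0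
      · rw [if_pos hjRY, if_pos hv, if_pos ⟨hnj', hv⟩, mul_neg_one]
      · rw [if_pos hjRY, if_neg hv, if_neg (by intro hc; exact hv hc.2)]
    · have hnj' : ¬ (pvNeg n j = true) := fun hc => hjRY (hnj.2 hc)
      rw [if_neg hjRY, if_neg (by intro hc; exact hnj' hc.1)]
  · have hni' : ¬ (pvNeg n i = true) := fun hc => hiRY (hni.2 hc)
    have hw : (if (i : Int) ∈ RY then
          (pvRowT f n (n / 2 - 1 - (min i (n - 1 - i)) / 2)).map (· * (-1))
        else pvRowT f n (n / 2 - 1 - (min i (n - 1 - i)) / 2)).getD j 0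
        = f ^ (n / 2 - 1 - (min i (n - 1 - i)) / 2 - (min j (n - 1 - j)) / 2) := by
      rw [if_neg hiRY, pvRowT_getD f n _ j hjn]
    rw [hw]
    simp only [if_neg hni']
    by_cases hjRY : (j : Int) ∈ RY
    · have hnj' : pvNeg n j = true := hnj.1 hjRY
      by_cases hv : f ^ (n / 2 - 1 - (min i (n - 1 - i)) / 2 - (min j (n - 1 - j)) / 2) > 0
      · rw [if_pos hjRY, if_pos hv, if_pos ⟨hnj', hv⟩, mul_neg_one]
      · rw [if_pos hjRY, if_neg hv, if_neg (by intro hc; exact hv hc.2)]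
    · have hnj' : ¬ (pvNeg n j = true) := fun hc => hjRY (hnj.2 hc)
      rw [if_neg hjRY, if_neg (by intro hc; exact hnj' hc.1)]

-- ===== VERDICT =====
theorem createTab_spec : Claim_unchanged_createTab := by
  intro f s _ hpre
  unfold Spec_createTab
  intro hnd
  unfold Pre_createTab at hpre
  unfold D_createTab at hnd
  rcases (by omega : s ≤ 0 ∨ (2 ≤ s ∧ s % 2 = 0)) with hneg | ⟨h2, hev⟩
  · rw [pvA_nil f s hneg, pvB_nil f s hneg]
  · obtain ⟨n, rfl⟩ : ∃ n : Nat, s = (n : Int) := ⟨s.toNat, by omega⟩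
    have hn : n % 2 = 0 := by omega
    have h2n : 2 ≤ n := by exact_mod_cast h2
    have hf : 4 ≤ n → f ≠ 0 := by
      intro h4 hf0
      exact hpre.2 ⟨hf0, by exact_mod_cast Nat.cast_le.2 h4⟩
    rw [pvA_eq f n hn h2n hf, pvB_eq f n hn]

theorem createTab_changed : Claim_changed_createTab := by unfold Claim_changed_createTab; decide
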